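-- pv_equiv track=rewrite | github.com/stsewd/advent-of-code-2023 | 15.py | solve
-- ===== SOURCE A (Python) =====
-- def solve(text: str) -> int:
--     total = 0
--     for word in text.strip().split(","):
--         subtotal = 0
--         for c in word:
--             subtotal = ((subtotal + ord(c)) * 17) % 256
--         total += subtotal
--
--     return total
-- ===== SOURCE B (Python) =====
-- def solve(text: str) -> int:
--     total = 0
--     subtotal = 0
--     for c in text.strip():
--         if c == ',':
--             total += subtotal
--             subtotal = 0
--         else:
--             subtotal = ((subtotal + ord(c)) * 17) % 256
--     return total + subtotal
-- ===== Notes on version B (the rewrite author's own statement) =====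
-- stated objective: alternative
-- what changed: Replaces the split-then-hash-each-word nested loops by one flat pass over the stripped string's characters that detects comma delimiters inline and maintains a running subtotal and grand total, never building the word list.
import Mathlib
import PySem

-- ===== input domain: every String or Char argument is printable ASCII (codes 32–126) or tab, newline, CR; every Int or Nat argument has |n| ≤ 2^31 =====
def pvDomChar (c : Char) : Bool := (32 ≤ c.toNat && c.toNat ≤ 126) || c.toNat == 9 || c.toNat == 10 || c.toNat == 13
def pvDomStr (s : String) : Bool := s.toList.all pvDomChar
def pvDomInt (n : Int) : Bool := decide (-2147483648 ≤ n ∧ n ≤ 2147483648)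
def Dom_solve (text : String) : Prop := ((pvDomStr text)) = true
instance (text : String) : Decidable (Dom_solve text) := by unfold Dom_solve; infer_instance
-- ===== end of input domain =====

-- B replaces the split-then-hash-each-word nested loops by one flat pass with ',' detection (alternative decomposition, same cost).

-- ===== PORT A =====
-- inner loop of A: AoC hash of one word
def hashWord (w : List Char) : Int :=
  w.foldl (fun subtotal c => PySem.Int.mod ((subtotal + (c.toNat : Int)) * 17) 256) 0

def solve (text : String) : Int :=
  (PySem.Chars.splitOn (PySem.Str.strip text).toList [',']).foldl
    (fun total w => total + hashWord w) 0

-- ===== PORT B =====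
def solve_alt (text : String) : Int :=
  let r := (PySem.Str.strip text).toList.foldl
    (fun (p : Int × Int) c =>
      if c = ',' then (p.1 + p.2, 0)
      else (p.1, PySem.Int.mod ((p.2 + (c.toNat : Int)) * 17) 256)) (0, 0)
  r.1 + r.2

-- ===== PRECONDITION & SPEC =====
def Spec_solve (text : String) (out : Int) : Prop := out = solve_alt text
instance (text : String) (out : Int) : Decidable (Spec_solve text out) := by unfold Spec_solve; infer_instance

-- ===== CLAIM (what is proved, stated in full; the proofs are below) =====
def Claim_equal_solve : Prop := ∀ (text : String), Dom_solve text → Spec_solve text (solve text)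

-- ===== LEMMAS AND PROOFS =====

-- proof-side step function
def pvStep (s : Int) (c : Char) : Int := PySem.Int.mod ((s + (c.toNat : Int)) * 17) 256

-- recursive form of B's loop
def bpass : List Char → Int → Int → Int
  | [], t, s => t + s
  | c :: rest, t, s => if c = ',' then bpass rest (t + s) 0 else bpass rest t (pvStep s c)

def sumA (ws : List (List Char)) : Int := ws.foldl (fun total w => total + hashWord w) 0

lemma hashWord_eq_foldl (w : List Char) : hashWord w = w.foldl pvStep 0 := rfl

lemma foldl_step_append (w : List Char) (c : Char) (a : Int) :
    (w ++ [c]).foldl pvStep a = pvStep (w.foldl pvStep a) c := by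
  simp [List.foldl_append]

lemma sumA_append (ws : List (List Char)) (w : List Char) :
    sumA (ws ++ [w]) = sumA ws + hashWord w := by
  simp [sumA, List.foldl_append]

lemma bpass_shift (l : List Char) (t s : Int) : bpass l t s = t + bpass l 0 s := by
  induction l generalizing t s with
  | nil => simp [bpass]
  | cons c rest ih =>
    by_cases hc : c = ','
    · subst hc
      simp only [bpass, reduceIte]
      rw [ih (t + s) 0, ih (0 + s) 0]; ring
    · simp only [bpass, if_neg hc]
      exact ih t (pvStep s c)

lemma go_sum (fuel : Nat) (l cur : List Char) (acc : List (List Char))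
    (h : l.length ≤ fuel) :
    sumA (PySem.Chars.splitOn.go [','] fuel l cur acc)
      = sumA acc.reverse + bpass l 0 (cur.reverse.foldl pvStep 0) := by
  induction fuel generalizing l cur acc with
  | zero =>
    have hl : l = [] := List.eq_nil_of_length_eq_zero (Nat.le_zero.mp h)
    subst hl
    simp [PySem.Chars.splitOn.go, sumA_append, bpass, hashWord_eq_foldl]
  | succ fuel ih =>
    cases l with
    | nil => simp [PySem.Chars.splitOn.go, sumA_append, bpass, hashWord_eq_foldl]
    | cons c rest =>
      by_cases hc : c = ','
      · subst hc
        have hpre : List.isPrefixOf [','] (',' :: rest) = true := by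
          simp [List.isPrefixOf]
        rw [PySem.Chars.splitOn.go]
        rw [if_pos hpre]
        rw [ih _ _ _ (by simpa using Nat.le_of_succ_le_succ h)]
        simp only [List.length_singleton, List.drop_succ_cons, List.drop_zero,
          List.reverse_cons, sumA_append, List.reverse_nil, List.foldl_nil]
        rw [bpass, if_pos rfl, bpass_shift rest (0 + _) 0,
            hashWord_eq_foldl]
        ring
      · have hpre : List.isPrefixOf [','] (c :: rest) = false := by
          simp [List.isPrefixOf]; exact fun hx => (hc hx.symm).elim
        rw [PySem.Chars.splitOn.go]
        rw [if_neg (by simp [hpre])]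
        rw [ih _ _ _ (by simpa using Nat.le_of_succ_le_succ h)]
        simp only [List.reverse_cons, foldl_step_append]
        rw [bpass, if_neg hc]

lemma bpass_eq_foldl (l : List Char) (t s : Int) :
    bpass l t s =
      ((l.foldl (fun (p : Int × Int) c =>
          if c = ',' then (p.1 + p.2, 0)
          else (p.1, PySem.Int.mod ((p.2 + (c.toNat : Int)) * 17) 256)) (t, s)).1
       + (l.foldl (fun (p : Int × Int) c =>
          if c = ',' then (p.1 + p.2, 0)
          else (p.1, PySem.Int.mod ((p.2 + (c.toNat : Int)) * 17) 256)) (t, s)).2) := by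
  induction l generalizing t s with
  | nil => simp [bpass]
  | cons c rest ih =>
    by_cases hc : c = ','
    · simpa [bpass, hc] using ih (t + s) 0
    · simpa [bpass, hc, pvStep] using ih t (pvStep s c)

lemma solve_eq_bpass (text : String) :
    solve text = bpass (PySem.Str.strip text).toList 0 0 := by
  show sumA (PySem.Chars.splitOn (PySem.Str.strip text).toList [','])
      = bpass (PySem.Str.strip text).toList 0 0
  rw [PySem.Chars.splitOn, go_sum _ _ _ _ (Nat.le_succ _)]
  simp [sumA]

-- ===== VERDICT (by name: the statement is the Claim_ definition above) =====
theorem solve_spec : Claim_equal_solve := by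
  intro text _
  show solve text = solve_alt text
  rw [solve_eq_bpass, solve_alt, bpass_eq_foldl]
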